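-- pv_equiv track=rewrite | github.com/kdylsky/codekata | codekata31-60/codekata42.py | solution
-- ===== SOURCE A (Python) =====
-- def solution(arr1, arr2):
--     answer = []
--     for k in range(len(arr1)):
--         temp = []
--         for i,j in zip(arr1,arr2):
--             temp.append(i[k]+j[k])
--         answer.append(temp)
--
--     return answer
-- ===== SOURCE B (Python) =====
-- def solution(arr1, arr2):
--     summed = [[x + y for x, y in zip(r1, r2)] for r1, r2 in zip(arr1, arr2)]
--     return [[row[k] for row in summed] for k in range(len(arr1))]
-- ===== Notes on version B (the rewrite author's own statement) =====
-- stated objective: alternative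
-- what changed: A interleaves addition and transposition in a fused column-outer/row-inner nested loop; B first builds the full element-wise sum matrix in one pass over zipped rows, then emits the result by reading that table column-wise (precompute-then-transpose, two differently shaped passes).
import Mathlib
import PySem

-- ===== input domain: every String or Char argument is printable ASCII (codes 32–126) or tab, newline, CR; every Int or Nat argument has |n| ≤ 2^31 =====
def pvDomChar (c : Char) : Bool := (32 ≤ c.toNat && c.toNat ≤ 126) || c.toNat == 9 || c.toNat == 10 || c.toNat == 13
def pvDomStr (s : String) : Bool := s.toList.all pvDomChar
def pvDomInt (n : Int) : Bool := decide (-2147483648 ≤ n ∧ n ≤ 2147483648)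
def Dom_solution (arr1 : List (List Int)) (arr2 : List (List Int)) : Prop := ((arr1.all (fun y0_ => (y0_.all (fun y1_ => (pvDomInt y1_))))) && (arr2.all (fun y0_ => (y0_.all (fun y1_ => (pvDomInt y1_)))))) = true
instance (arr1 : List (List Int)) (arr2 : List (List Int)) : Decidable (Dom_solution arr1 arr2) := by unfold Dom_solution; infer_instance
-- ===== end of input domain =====

-- B replaces A's fused column-outer/row-inner loop by building the element-wise sum
-- matrix first and then reading it column-wise (alternative decomposition, same cost).

-- ===== PORT A =====
-- literal port of A: outer loop over k in range(len(arr1)), inner loop over zip(arr1,arr2),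
-- appending i[k]+j[k] (pyGet? with default 0; Pre_ guarantees the index is in range).
def solution (arr1 : List (List Int)) (arr2 : List (List Int)) : List (List Int) :=
  (List.range arr1.length).foldl (fun answer (k : Nat) =>
    answer ++ [ (arr1.zip arr2).foldl (fun temp p =>
        temp ++ [ (PySem.List.pyGet? p.1 (k : Int)).getD 0
                  + (PySem.List.pyGet? p.2 (k : Int)).getD 0 ]) [] ]) []

-- ===== PORT B =====
-- literal port of B: summed = element-wise sums of zipped rows, then transpose-read summed.
def solution_alt (arr1 : List (List Int)) (arr2 : List (List Int)) : List (List Int) :=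
  let summed := (arr1.zip arr2).map (fun p => (p.1.zip p.2).map (fun q => q.1 + q.2))
  (List.range arr1.length).map (fun (k : Nat) =>
    summed.map (fun row => (PySem.List.pyGet? row (k : Int)).getD 0))

-- ===== PRECONDITION & SPEC =====
-- Pre_: every zipped row pair has both rows of length ≥ len(arr1); on shorter rows A raises IndexError.
def Pre_solution (arr1 : List (List Int)) (arr2 : List (List Int)) : Prop :=
  ∀ p ∈ arr1.zip arr2, arr1.length ≤ p.1.length ∧ arr1.length ≤ p.2.length
instance (arr1 : List (List Int)) (arr2 : List (List Int)) : Decidable (Pre_solution arr1 arr2) := by unfold Pre_solution; infer_instance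
def pvWitness_solution : List (List Int) × List (List Int) := ([[1, 2], [3, 4]], [[5, 6], [7, 8]])
def Spec_solution (arr1 : List (List Int)) (arr2 : List (List Int)) (out : List (List Int)) : Prop := out = solution_alt arr1 arr2
instance (arr1 : List (List Int)) (arr2 : List (List Int)) (out : List (List Int)) : Decidable (Spec_solution arr1 arr2 out) := by unfold Spec_solution; infer_instance

-- ===== CLAIM (what is proved, stated in full; the proofs are below) =====
def Claim_equal_solution : Prop := ∀ (arr1 : List (List Int)) (arr2 : List (List Int)), Dom_solution arr1 arr2 → Pre_solution arr1 arr2 → Spec_solution arr1 arr2 (solution arr1 arr2)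

-- ===== LEMMAS AND PROOFS =====

-- the inner loop of A (append-singleton fold) is a map over the zipped rows
theorem solution_eq_map (arr1 arr2 : List (List Int)) :
    solution arr1 arr2 =
      (List.range arr1.length).map (fun (k : Nat) =>
        (arr1.zip arr2).map (fun p =>
          (PySem.List.pyGet? p.1 (k : Int)).getD 0 + (PySem.List.pyGet? p.2 (k : Int)).getD 0)) := by
  unfold solution
  rw [PySem.List.foldl_append_singleton_eq_map]
  refine List.map_congr_left (fun k _ => ?_)
  rw [PySem.List.foldl_append_singleton_eq_map, List.nil_append]

-- reading the summed row at an in-range column is the sum of the two row entries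
theorem summed_get (r1 r2 : List Int) (k : Nat)
    (h1 : k < r1.length) (h2 : k < r2.length) :
    (PySem.List.pyGet? ((r1.zip r2).map (fun q => q.1 + q.2)) (k : Int)).getD 0
      = (PySem.List.pyGet? r1 (k : Int)).getD 0 + (PySem.List.pyGet? r2 (k : Int)).getD 0 := by
  have hz : k < (r1.zip r2).length := by simp [List.length_zip]; omega
  simp [h1, h2, List.getElem_zip]

-- ===== VERDICT (by name: the statement is the Claim_ definition above) =====
theorem solution_spec : Claim_equal_solution := by
  intro arr1 arr2 _ hpre
  unfold Spec_solution solution_alt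
  rw [solution_eq_map]
  refine List.map_congr_left (fun k hk => ?_)
  rw [List.mem_range] at hk
  rw [List.map_map]
  refine List.map_congr_left (fun p hp => ?_)
  obtain ⟨h1, h2⟩ := hpre p hp
  exact (summed_get p.1 p.2 k (lt_of_lt_of_le hk h1) (lt_of_lt_of_le hk h2)).symm
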